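-- pv_equiv track=rewrite | github.com/Scr1pting/42-BWInf-Runde-1 | 1. Arukone/src/solve.py | has_path_combination
-- ===== SOURCE A (Python) =====
-- def has_path_combination(all_paths: list, existing_path_combination: list = [], index: int = 0) -> bool:
--     """Recursively checks if there is a valid combination of paths that connects
--     all pairs of numbers.
--
--     Args:
--         all_paths (list): a 3d array containing the paths of all pairs of numbers.
--         existing_path_combination (list, optional): A one-dimensional list containing the tuples of the paths of the previously already checked number pairs. Defaults to [].
--         index (int, optional): Index of the 3d array. Defaults to 0.
--
--     Returns:
--         bool: whether or not there is a valid combination of paths connecting all pairs of numbers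
--     """
--
--     # TODO Try using itertools to generate all path combinations. Thereby, the maximum recursion depth of 6 can be circumvented
--
--     # Get a list of the paths at the provided index of the all_paths array
--     paths = all_paths[index]
--
--     # Iterate of each path
--     for path in paths:
--         # Check that there is no overlap between the new path and the existing combination of paths
--         if len(set(path) & set(existing_path_combination)) == 0:
--             if index == len(all_paths) - 1:
--                 # Last element in array
--                 # Means that all previous checks succeeded, and that there is a possible solution
--                 return True
--             else:
--                 # Not at last check yet
--                 # Continue checking for the paths that follow.
--                 value = has_path_combination(
--                     all_paths=all_paths,
--                     existing_path_combination=existing_path_combination + path,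
--                     index=index + 1
--                 )
--
--                 # Only return a value if that value is True
--                 # Otherwise, the function would return the value of the first path it examined,
--                 # even if a valid combination of paths exists
--                 if value == True:
--                     return True
--
--     # Default to False
--     return False
-- ===== SOURCE B (Python) =====
-- def has_path_combination(all_paths: list, existing_path_combination: list = [], index: int = 0) -> bool:
--     # Breadth-first over pair groups: maintain every feasible set of used cells
--     # instead of depth-first recursion with backtracking.
--     states = [set(existing_path_combination)]
--     for i in range(index, len(all_paths)):
--         group = all_paths[i]
--         next_states = []
--         for used in states:
--             for path in group:
--                 cells = set(path)
--                 if not (used & cells):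
--                     next_states.append(used | cells)
--         states = next_states
--     return len(states) > 0
-- ===== Notes on version B (the rewrite author's own statement) =====
-- stated objective: alternative
-- what changed: Replaces A's depth-first recursive backtracking with an iterative breadth-first sweep over the pair groups that maintains the list of all feasible used-cell sets and checks nonemptiness at the end.
import Mathlib
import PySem

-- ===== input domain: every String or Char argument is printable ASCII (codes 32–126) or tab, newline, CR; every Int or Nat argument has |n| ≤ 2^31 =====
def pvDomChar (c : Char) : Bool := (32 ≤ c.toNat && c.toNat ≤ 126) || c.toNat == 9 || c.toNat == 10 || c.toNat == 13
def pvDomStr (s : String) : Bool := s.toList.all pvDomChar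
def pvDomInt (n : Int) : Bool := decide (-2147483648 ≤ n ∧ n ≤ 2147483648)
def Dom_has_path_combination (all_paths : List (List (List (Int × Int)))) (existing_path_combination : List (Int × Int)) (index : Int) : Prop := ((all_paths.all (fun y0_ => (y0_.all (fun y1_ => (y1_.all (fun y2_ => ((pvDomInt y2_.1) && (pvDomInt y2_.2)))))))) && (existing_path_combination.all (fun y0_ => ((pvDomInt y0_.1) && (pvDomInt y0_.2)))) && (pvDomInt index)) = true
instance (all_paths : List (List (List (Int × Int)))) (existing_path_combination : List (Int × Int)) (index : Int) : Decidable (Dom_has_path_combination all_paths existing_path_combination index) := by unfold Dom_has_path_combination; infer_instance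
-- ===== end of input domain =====

-- B replaces A's depth-first recursive backtracking over pair groups by an iterative
-- breadth-first sweep maintaining all feasible used-cell sets (objective: alternative).


-- ===== PORT A =====
-- Recursive depth-first backtracking, exactly as A.  `fuel` only bounds the recursion
-- depth so the definition is total: A recurses at most (len - index) times, and the
-- top-level call supplies more than enough fuel for every input Pre_ admits.
def hpcGo (all_paths : List (List (List (Int × Int)))) (fuel : Nat)
    (existing : List (Int × Int)) (index : Int) : Bool :=
  match fuel with
  | 0 => false
  | fuel + 1 =>
    match PySem.List.pyGet? all_paths index with
    | none => false      -- Python raises IndexError here (excluded by Pre_)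
    | some paths =>
      -- for path in paths: … return True … ; default False  ≡  paths.any
      paths.any (fun path =>
        ((PySem.Set.ofList path).inter (PySem.Set.ofList existing)).length == 0
          && (index == (all_paths.length : Int) - 1
              || hpcGo all_paths fuel (existing ++ path) (index + 1)))

def has_path_combination (all_paths : List (List (List (Int × Int)))) (existing_path_combination : List (Int × Int)) (index : Int) : Bool :=
  hpcGo all_paths (2 * all_paths.length + 1) existing_path_combination index

-- ===== PORT B =====
-- One breadth-first step: from every feasible used-cell set, try every path of group i.
def hpcStep (all_paths : List (List (List (Int × Int))))
    (states : List (PySem.Set (Int × Int))) (i : Int) : List (PySem.Set (Int × Int)) :=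
  match PySem.List.pyGet? all_paths i with
  | none => []          -- Python raises IndexError here (excluded by Pre_)
  | some group =>
    states.flatMap (fun used =>
      group.filterMap (fun path =>
        let cells := PySem.Set.ofList path
        if (used.inter cells).length == 0 then some (used.union cells) else none))

def has_path_combination_alt (all_paths : List (List (List (Int × Int)))) (existing_path_combination : List (Int × Int)) (index : Int) : Bool :=
  let states := (PySem.List.pyRange index (all_paths.length : Int) 1).foldl
      (hpcStep all_paths) [PySem.Set.ofList existing_path_combination]
  decide (0 < states.length)

-- ===== PRECONDITION & SPEC =====
-- Pre_ is exactly where Python A returns: the very first statement all_paths[index]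
-- raises IndexError unless -len ≤ index < len, and every recursive call stays in range.
def Pre_has_path_combination (all_paths : List (List (List (Int × Int)))) (existing_path_combination : List (Int × Int)) (index : Int) : Prop :=
  PySem.Raise.InRange all_paths.length index
instance (all_paths : List (List (List (Int × Int)))) (existing_path_combination : List (Int × Int)) (index : Int) : Decidable (Pre_has_path_combination all_paths existing_path_combination index) := by unfold Pre_has_path_combination; infer_instance

def pvWitness_has_path_combination : (List (List (List (Int × Int)))) × (List (Int × Int)) × Int :=
  ([[[(0, 0), (0, 1)]], [[(2, 2)]]], [(3, 3)], 0)

def Spec_has_path_combination (all_paths : List (List (List (Int × Int)))) (existing_path_combination : List (Int × Int)) (index : Int) (out : Bool) : Prop := out = has_path_combination_alt all_paths existing_path_combination index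
instance (all_paths : List (List (List (Int × Int)))) (existing_path_combination : List (Int × Int)) (index : Int) (out : Bool) : Decidable (Spec_has_path_combination all_paths existing_path_combination index out) := by unfold Spec_has_path_combination; infer_instance

-- ===== CLAIM (what is proved, stated in full; the proofs are below) =====
def Claim_equal_has_path_combination : Prop := ∀ (all_paths : List (List (List (Int × Int)))) (existing_path_combination : List (Int × Int)) (index : Int), Dom_has_path_combination all_paths existing_path_combination index → Pre_has_path_combination all_paths existing_path_combination index → Spec_has_path_combination all_paths existing_path_combination index (has_path_combination all_paths existing_path_combination index)


-- ===== LEMMAS AND PROOFS =====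

-- B's result from suffix gs of group indices, starting from the single state u.
def hpcN (all_paths : List (List (List (Int × Int)))) (gs : List Int) (u : PySem.Set (Int × Int)) : Bool :=
  decide (0 < (gs.foldl (hpcStep all_paths) [u]).length)

theorem hpcStep_append (ap : List (List (List (Int × Int)))) (S T : List (PySem.Set (Int × Int))) (i : Int) :
    hpcStep ap (S ++ T) i = hpcStep ap S i ++ hpcStep ap T i := by
  unfold hpcStep; cases PySem.List.pyGet? ap i <;> simp

theorem foldl_hpcStep_append (ap : List (List (List (Int × Int)))) (gs : List Int) (S T : List (PySem.Set (Int × Int))) :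
    gs.foldl (hpcStep ap) (S ++ T) = gs.foldl (hpcStep ap) S ++ gs.foldl (hpcStep ap) T := by
  induction gs generalizing S T with
  | nil => simp
  | cons i gs ih => simp [List.foldl_cons, hpcStep_append, ih]

theorem foldl_hpcStep_nil (ap : List (List (List (Int × Int)))) (gs : List Int) :
    gs.foldl (hpcStep ap) [] = [] := by
  induction gs with
  | nil => rfl
  | cons i gs ih =>
    have h : hpcStep ap [] i = [] := by unfold hpcStep; cases PySem.List.pyGet? ap i <;> simp
    simp [List.foldl_cons, h, ih]

-- Folding the remaining indices from a filterMapped level is an `any` over the level.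
theorem fold_filterMap_any (ap : List (List (List (Int × Int)))) (gs : List Int)
    (c : List (Int × Int) → Bool) (m : List (Int × Int) → PySem.Set (Int × Int)) :
    ∀ g : List (List (Int × Int)),
      decide (0 < (gs.foldl (hpcStep ap) (g.filterMap (fun p => if c p then some (m p) else none))).length)
        = g.any (fun p => c p && decide (0 < (gs.foldl (hpcStep ap) [m p]).length)) := by
  intro g
  induction g with
  | nil => simp [foldl_hpcStep_nil]
  | cons p g ih =>
    by_cases hc : c p = true
    · have hfm : (p :: g).filterMap (fun q => if c q then some (m q) else none)
          = [m p] ++ g.filterMap (fun q => if c q then some (m q) else none) := by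
        simp [hc]
      rw [hfm, foldl_hpcStep_append, List.any_cons, hc]
      simp only [List.length_append, Bool.true_and]
      rw [← ih]
      by_cases h1 : 0 < (gs.foldl (hpcStep ap) [m p]).length <;>
        by_cases h2 : 0 < (gs.foldl (hpcStep ap)
          (g.filterMap (fun q => if c q then some (m q) else none))).length <;>
        simp [h1, h2]
    · have hfm : (p :: g).filterMap (fun q => if c q then some (m q) else none)
          = g.filterMap (fun q => if c q then some (m q) else none) := by
        simp [hc]
      rw [hfm, List.any_cons]
      simp only [Bool.not_eq_true] at hc
      rw [hc]
      simpa using ih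

-- Characterisation of one breadth-first step from a single state.
theorem hpcN_cons (ap : List (List (List (Int × Int)))) (gs : List Int) (u : PySem.Set (Int × Int))
    (i : Int) (group : List (List (Int × Int))) (hg : PySem.List.pyGet? ap i = some group) :
    hpcN ap (i :: gs) u =
      group.any (fun path =>
        ((u.inter (PySem.Set.ofList path)).length == 0)
          && hpcN ap gs (u.union (PySem.Set.ofList path))) := by
  unfold hpcN
  rw [List.foldl_cons]
  have hstep : hpcStep ap [u] i = group.filterMap (fun path =>
      if (u.inter (PySem.Set.ofList path)).length == 0
      then some (u.union (PySem.Set.ofList path)) else none) := by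
    unfold hpcStep; rw [hg]; simp
  rw [hstep]
  exact fold_filterMap_any ap gs _ _ group

-- the disjointness test depends only on membership in u
theorem inter_len_zero_iff (u : PySem.Set (Int × Int)) (path : List (Int × Int)) :
    ((u.inter (PySem.Set.ofList path)).length == 0) = decide (∀ x ∈ path, x ∉ u) := by
  rw [Bool.eq_iff_iff]
  simp only [beq_iff_eq, List.length_eq_zero_iff, decide_eq_true_eq,
    List.eq_nil_iff_forall_not_mem]
  constructor
  · intro h x hx hxu
    exact h x ((PySem.Set.mem_inter u (PySem.Set.ofList path) x).mpr
      ⟨hxu, (PySem.Set.mem_ofList path x).mpr hx⟩)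
  · intro h x hx
    rcases (PySem.Set.mem_inter u (PySem.Set.ofList path) x).mp hx with ⟨h1, h2⟩
    exact h x ((PySem.Set.mem_ofList path x).mp h2) h1

-- A's disjointness test: same Boolean, the intersection written the other way round
theorem interA_len_zero_iff (ex path : List (Int × Int)) :
    (((PySem.Set.ofList path).inter (PySem.Set.ofList ex)).length == 0)
      = decide (∀ x ∈ path, x ∉ PySem.Set.ofList ex) := by
  rw [Bool.eq_iff_iff]
  simp only [beq_iff_eq, List.length_eq_zero_iff, decide_eq_true_eq,
    List.eq_nil_iff_forall_not_mem]
  constructor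
  · intro h x hx hxu
    exact h x ((PySem.Set.mem_inter _ _ x).mpr ⟨(PySem.Set.mem_ofList path x).mpr hx, hxu⟩)
  · intro h x hx
    rcases (PySem.Set.mem_inter _ _ x).mp hx with ⟨h1, h2⟩
    exact h x ((PySem.Set.mem_ofList path x).mp h1) h2

-- hpcN only depends on the members of the start state
theorem hpcN_congr (ap : List (List (List (Int × Int)))) (gs : List Int) :
    ∀ (u v : PySem.Set (Int × Int)), (∀ x, x ∈ u ↔ x ∈ v) → hpcN ap gs u = hpcN ap gs v := by
  induction gs with
  | nil => intro u v _; rfl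
  | cons i gs ih =>
    intro u v huv
    cases hg : PySem.List.pyGet? ap i with
    | none =>
      have h0 : ∀ w : PySem.Set (Int × Int), hpcN ap (i :: gs) w = false := by
        intro w
        unfold hpcN
        rw [List.foldl_cons]
        have : hpcStep ap [w] i = [] := by unfold hpcStep; rw [hg]
        rw [this, foldl_hpcStep_nil]
        simp
      rw [h0 u, h0 v]
    | some group =>
      rw [hpcN_cons ap gs u i group hg, hpcN_cons ap gs v i group hg]
      refine List.any_congr rfl ?_
      intro path
      have hcond : ((u.inter (PySem.Set.ofList path)).length == 0)
          = ((v.inter (PySem.Set.ofList path)).length == 0) := by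
        rw [inter_len_zero_iff, inter_len_zero_iff]
        simp only [decide_eq_decide]
        constructor
        · intro h x hx hxv; exact h x hx ((huv x).mpr hxv)
        · intro h x hx hxu; exact h x hx ((huv x).mp hxu)
      rw [hcond]
      have hmem : ∀ x, x ∈ u.union (PySem.Set.ofList path) ↔ x ∈ v.union (PySem.Set.ofList path) := by
        intro x
        rw [PySem.Set.mem_union, PySem.Set.mem_union, huv x]
      rw [ih _ _ hmem]

-- Main induction: A's recursion computes B's breadth-first result on the remaining indices.
theorem hpcGo_eq_hpcN (ap : List (List (List (Int × Int)))) :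
    ∀ (fuel : Nat) (ex : List (Int × Int)) (index : Int),
      PySem.Raise.InRange ap.length index →
      ((ap.length : Int) - index).toNat < fuel →
      hpcGo ap fuel ex index
        = hpcN ap (PySem.List.pyRange index (ap.length : Int) 1) (PySem.Set.ofList ex) := by
  intro fuel
  induction fuel with
  | zero =>
    intro ex index hin hf
    exfalso
    rcases hin with ⟨h1, h2⟩
    omega
  | succ fuel ih =>
    intro ex index hin hf
    rcases hin with ⟨h1, h2⟩
    have hne : PySem.List.pyGet? ap index ≠ none := by
      intro h0
      exact (PySem.List.pyGet?_eq_none_iff ap index).mp h0 ⟨h1, h2⟩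
    rcases Option.ne_none_iff_exists'.mp hne with ⟨g, hg⟩
    have hrange : PySem.List.pyRange index (ap.length : Int) 1
        = index :: PySem.List.pyRange (index + 1) (ap.length : Int) 1 :=
      PySem.List.pyRange_one_cons h2
    rw [hrange, hpcN_cons ap _ _ index g hg]
    unfold hpcGo
    rw [hg]
    refine List.any_congr rfl ?_
    intro path
    have hcond : (((PySem.Set.ofList path).inter (PySem.Set.ofList ex)).length == 0)
        = (((PySem.Set.ofList ex).inter (PySem.Set.ofList path)).length == 0) := by
      rw [interA_len_zero_iff, inter_len_zero_iff]
    rw [hcond]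
    by_cases hlast : index = (ap.length : Int) - 1
    · have hb : (index == (ap.length : Int) - 1) = true := by simpa using hlast
      have hempty : PySem.List.pyRange (index + 1) (ap.length : Int) 1 = [] := by
        simp [PySem.List.pyRange_one]
        omega
      rw [hb, hempty]
      have : hpcN ap [] ((PySem.Set.ofList ex).union (PySem.Set.ofList path)) = true := by
        unfold hpcN; simp
      rw [this]
      simp
    · have hb : (index == (ap.length : Int) - 1) = false := by simpa using hlast
      rw [hb]
      have hrec := ih (ex ++ path) (index + 1) ⟨by omega, by omega⟩ (by omega)
      rw [hrec]
      have hmem : ∀ x, x ∈ PySem.Set.ofList (ex ++ path)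
          ↔ x ∈ (PySem.Set.ofList ex).union (PySem.Set.ofList path) := by
        intro x
        rw [PySem.Set.mem_ofList, PySem.Set.mem_union, PySem.Set.mem_ofList,
          PySem.Set.mem_ofList, List.mem_append]
      rw [hpcN_congr ap _ _ _ hmem]
      simp

-- ===== VERDICT (by name: the statement is the Claim_ definition above) =====
theorem has_path_combination_spec : Claim_equal_has_path_combination := by
  intro ap ex index _ hpre
  unfold Spec_has_path_combination has_path_combination has_path_combination_alt
  rcases hpre with ⟨h1, h2⟩
  exact hpcGo_eq_hpcN ap (2 * ap.length + 1) ex index ⟨h1, h2⟩ (by omega)
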